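-- pv_equiv track=rewrite | github.com/MSMRo/TOEFL_LISTENING_TASK2 | _old/speak3.py | pick_offline_voice_for_role
-- ===== SOURCE A (Python) =====
-- from typing import Dict, List, Tuple, Optional
--
-- FEMALE_HINTS = [
--     "samantha", "victoria", "karen", "serena",     # macOS
--     "zira",                                        # Windows
--     "en-us+f", "en-uk+f", "en+f", "+f1", "+f2",    # eSpeak-NG
--     "female"
-- ]
--
-- MALE_HINTS = [
--     "alex", "daniel", "david",                     # macOS/Windows
--     "en-us+m", "en-uk+m", "en+m", "+m1", "+m2",    # eSpeak-NG
--     "male"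
-- ]
--
-- def match_any(s: str, hints: List[str]) -> bool:
--     s = (s or "").lower()
--     return any(h in s for h in hints)
--
-- def looks_female(v: Dict) -> bool:
--     return match_any(v.get("gender",""), ["female"]) or match_any(v.get("name",""), FEMALE_HINTS) or match_any(v.get("id",""), FEMALE_HINTS)
--
-- def looks_male(v: Dict) -> bool:
--     return match_any(v.get("gender",""), ["male"]) or match_any(v.get("name",""), MALE_HINTS) or match_any(v.get("id",""), MALE_HINTS)
--
-- def pick_offline_voice_for_role(role: str, voices_all: List[Dict], used_ids: set) -> Optional[str]:
--     rlow = (role or "").lower()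
--     prefer_female = any(k in rlow for k in ["student", "woman", "female", "girl"])
--     prefer_male   = any(k in rlow for k in ["prof", "teacher", "man", "male", "boy"])
--
--     def pick(fn):
--         cands = [v for v in voices_all if fn(v) and v["id"] not in used_ids]
--         return cands[0]["id"] if cands else None
--
--     if prefer_female:
--         vid = pick(looks_female)
--         if vid: return vid
--     if prefer_male:
--         vid = pick(looks_male)
--         if vid: return vid
--
--     # Try female then male for diversity
--     vid = pick(looks_female)
--     if vid: return vid
--     vid = pick(looks_male)
--     if vid: return vid
--
--     # Fallback: first unused
--     for v in voices_all:
--         if v["id"] not in used_ids: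
--             return v["id"]
--     return voices_all[0]["id"] if voices_all else None
-- ===== SOURCE B (Python) =====
-- from typing import Dict, List, Optional
--
-- FEMALE_HINTS = [
--     "samantha", "victoria", "karen", "serena",
--     "zira",
--     "en-us+f", "en-uk+f", "en+f", "+f1", "+f2",
--     "female"
-- ]
--
-- MALE_HINTS = [
--     "alex", "daniel", "david",
--     "en-us+m", "en-uk+m", "en+m", "+m1", "+m2",
--     "male"
-- ]
--
-- def match_any(s: str, hints: List[str]) -> bool:
--     s = (s or "").lower()
--     return any(h in s for h in hints)
--
-- def looks_female(v: Dict) -> bool: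
--     return match_any(v.get("gender",""), ["female"]) or match_any(v.get("name",""), FEMALE_HINTS) or match_any(v.get("id",""), FEMALE_HINTS)
--
-- def looks_male(v: Dict) -> bool:
--     return match_any(v.get("gender",""), ["male"]) or match_any(v.get("name",""), MALE_HINTS) or match_any(v.get("id",""), MALE_HINTS)
--
-- def pick_offline_voice_for_role(role: str, voices_all: List[Dict], used_ids: set) -> Optional[str]:
--     rlow = (role or "").lower()
--     preds = []
--     if any(k in rlow for k in ["student", "woman", "female", "girl"]):
--         preds.append(looks_female)
--     if any(k in rlow for k in ["prof", "teacher", "man", "male", "boy"]):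
--         preds.append(looks_male)
--     preds += [looks_female, looks_male]
--
--     # one pass: remember, for each predicate, the id of the first unused voice matching it
--     firsts = [None] * len(preds)
--     for v in voices_all:
--         for i, p in enumerate(preds):
--             if firsts[i] is None and p(v) and v["id"] not in used_ids:
--                 firsts[i] = v["id"]
--     for vid in firsts:
--         if vid:  # a found-but-empty id skips this predicate, like A's truthiness test
--             return vid
--
--     # fallback: first unused, else the very first voice, else None
--     for v in voices_all:
--         if v["id"] not in used_ids:
--             return v["id"]
--     return voices_all[0]["id"] if voices_all else None
-- ===== Notes on version B (the rewrite author's own statement) =====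
-- stated objective: alternative
-- what changed: A runs up to four separate filter passes over the voice list (one per gender predicate, in preference order) plus a fallback scan; B builds the effective predicate order once and makes a single pass over the voices recording, per predicate, the first unused matching id, then reads the slots off in order.
-- outside the precondition, e.g. on pick_offline_voice_for_role('', [{'id': 'a'}, {}], set()): A returns 'a', B returns 'a'; on pick_offline_voice_for_role('', [{}], set()): A raises KeyError, B raises KeyError
import Mathlib
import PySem

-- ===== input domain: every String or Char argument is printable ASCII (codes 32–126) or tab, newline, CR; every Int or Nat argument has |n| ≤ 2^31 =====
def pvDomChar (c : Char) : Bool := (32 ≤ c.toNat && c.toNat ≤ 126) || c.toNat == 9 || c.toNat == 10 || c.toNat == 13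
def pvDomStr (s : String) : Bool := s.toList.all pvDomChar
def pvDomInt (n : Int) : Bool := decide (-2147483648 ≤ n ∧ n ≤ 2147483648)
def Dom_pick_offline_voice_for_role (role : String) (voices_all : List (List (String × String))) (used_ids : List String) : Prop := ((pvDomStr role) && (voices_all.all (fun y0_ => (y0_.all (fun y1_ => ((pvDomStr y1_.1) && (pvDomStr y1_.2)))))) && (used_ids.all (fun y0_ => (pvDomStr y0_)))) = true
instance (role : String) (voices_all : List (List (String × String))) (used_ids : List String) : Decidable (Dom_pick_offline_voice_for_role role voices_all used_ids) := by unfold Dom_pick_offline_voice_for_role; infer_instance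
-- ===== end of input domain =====

-- B replaces A's sequence of up-to-four full filter passes (one per gender predicate) by a single
-- pass over the voices that records, for each predicate, the first unused matching id (objective:
-- alternative decomposition; return value only — neither program mutates its arguments).

-- ===== PORT A =====
-- shared module helpers (identical source text in Source A and Source B)
def pvFEMALE_HINTS : List String :=
  ["samantha", "victoria", "karen", "serena", "zira",
   "en-us+f", "en-uk+f", "en+f", "+f1", "+f2", "female"]

def pvMALE_HINTS : List String :=
  ["alex", "daniel", "david", "en-us+m", "en-uk+m", "en+m", "+m1", "+m2", "male"]

def pvMatchAny (s : String) (hints : List String) : Bool :=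
  hints.any (fun h => PySem.Str.isIn h (PySem.Str.lower s))

-- v.get(k, "")
def pvGetS (v : List (String × String)) (k : String) : String :=
  PySem.Dict.getD (PySem.Dict.mk v) k ""

-- v["id"]; exact wherever "id" is a key of v (guaranteed by Pre_; Python raises KeyError otherwise)
def pvId (v : List (String × String)) : String :=
  PySem.Dict.getD (PySem.Dict.mk v) "id" ""

def pvLooksFemale (v : List (String × String)) : Bool :=
  pvMatchAny (pvGetS v "gender") ["female"] || pvMatchAny (pvGetS v "name") pvFEMALE_HINTS ||
    pvMatchAny (pvGetS v "id") pvFEMALE_HINTS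

def pvLooksMale (v : List (String × String)) : Bool :=
  pvMatchAny (pvGetS v "gender") ["male"] || pvMatchAny (pvGetS v "name") pvMALE_HINTS ||
    pvMatchAny (pvGetS v "id") pvMALE_HINTS

-- A's inner 'pick': cands = [v for v in voices if fn(v) and v["id"] not in used]; cands[0]["id"] or None
def pvPickA (voices : List (List (String × String))) (used : List String)
    (fn : List (String × String) → Bool) : Option String :=
  match voices.filter (fun v => fn v && !(used.contains (pvId v))) with
  | [] => none
  | c :: _ => some (pvId c)

-- the final fallback: first unused voice, else voices_all[0]["id"], else None (same lines in Source A and Source B)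
def pvFallback (voices : List (List (String × String))) (used : List String) : Option String :=
  match voices.find? (fun v => !(used.contains (pvId v))) with
  | some v => some (pvId v)
  | none =>
    match voices with
    | [] => none
    | v :: _ => some (pvId v)

-- 'if cond: vid = pick(fn); if vid: return vid' — note Python truthiness: an empty-string id falls through
def pvStep (cond : Bool) (o : Option String) (k : Option String) : Option String :=
  if cond then
    match o with
    | some v => if v == "" then k else some v
    | none => k
  else k

def pick_offline_voice_for_role (role : String) (voices_all : List (List (String × String))) (used_ids : List String) : Option String :=
  let rlow := PySem.Str.lower role
  let prefer_female := ["student", "woman", "female", "girl"].any (fun k => PySem.Str.isIn k rlow)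
  let prefer_male := ["prof", "teacher", "man", "male", "boy"].any (fun k => PySem.Str.isIn k rlow)
  pvStep prefer_female (pvPickA voices_all used_ids pvLooksFemale)
    (pvStep prefer_male (pvPickA voices_all used_ids pvLooksMale)
      (pvStep true (pvPickA voices_all used_ids pvLooksFemale)
        (pvStep true (pvPickA voices_all used_ids pvLooksMale)
          (pvFallback voices_all used_ids))))

-- ===== PORT B =====
-- state: (predicate, first unused matching id found so far) pairs, updated together in one pass
def pvScanStep (used : List String) (v : List (String × String))
    (st : List ((List (String × String) → Bool) × Option String)) :
    List ((List (String × String) → Bool) × Option String) :=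
  st.map (fun ps =>
    match ps.2 with
    | some x => (ps.1, some x)
    | none => if ps.1 v && !(used.contains (pvId v)) then (ps.1, some (pvId v)) else (ps.1, none))

def pick_offline_voice_for_role_alt (role : String) (voices_all : List (List (String × String))) (used_ids : List String) : Option String :=
  let rlow := PySem.Str.lower role
  let preds : List (List (String × String) → Bool) :=
    (if ["student", "woman", "female", "girl"].any (fun k => PySem.Str.isIn k rlow) then [pvLooksFemale] else []) ++
    (if ["prof", "teacher", "man", "male", "boy"].any (fun k => PySem.Str.isIn k rlow) then [pvLooksMale] else []) ++
    [pvLooksFemale, pvLooksMale]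
  let firsts := voices_all.foldl (fun st v => pvScanStep used_ids v st)
    (preds.map (fun p => (p, (none : Option String))))
  match firsts.findSome? (fun ps =>
      match ps.2 with
      | some id => if id == "" then none else some id
      | none => none) with
  | some id => some id
  | none => pvFallback voices_all used_ids

-- ===== PRECONDITION & SPEC =====
-- Pre_ excludes voice dicts lacking an "id" key: on those Python A raises KeyError whenever its
-- scan reaches such a voice, and returns only when it happens never to touch it.
def Pre_pick_offline_voice_for_role (role : String) (voices_all : List (List (String × String))) (used_ids : List String) : Prop :=
  ∀ v ∈ voices_all, (PySem.Dict.mk v).contains "id" = true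

instance (role : String) (voices_all : List (List (String × String))) (used_ids : List String) : Decidable (Pre_pick_offline_voice_for_role role voices_all used_ids) := by unfold Pre_pick_offline_voice_for_role; infer_instance

def pvWitness_pick_offline_voice_for_role : String × (List (List (String × String))) × List String :=
  ("student", [[("id", "zira"), ("name", "Zira")], [("id", "alex")]], ["alex"])

def Spec_pick_offline_voice_for_role (role : String) (voices_all : List (List (String × String))) (used_ids : List String) (out : Option String) : Prop := out = pick_offline_voice_for_role_alt role voices_all used_ids
instance (role : String) (voices_all : List (List (String × String))) (used_ids : List String) (out : Option String) : Decidable (Spec_pick_offline_voice_for_role role voices_all used_ids out) := by unfold Spec_pick_offline_voice_for_role; infer_instance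

-- ===== CLAIM (what is proved, stated in full; the proofs are below) =====
def Claim_equal_pick_offline_voice_for_role : Prop := ∀ (role : String) (voices_all : List (List (String × String))) (used_ids : List String), Dom_pick_offline_voice_for_role role voices_all used_ids → Pre_pick_offline_voice_for_role role voices_all used_ids → Spec_pick_offline_voice_for_role role voices_all used_ids (pick_offline_voice_for_role role voices_all used_ids)

-- ===== LEMMAS AND PROOFS =====

-- A's 'pick' is the first match of the filter condition
theorem pvPickA_eq_find (voices : List (List (String × String))) (used : List String)
    (fn : List (String × String) → Bool) :
    pvPickA voices used fn
      = (voices.find? (fun v => fn v && !(used.contains (pvId v)))).map pvId := by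
  induction voices with
  | nil => rfl
  | cons v vs ih =>
    simp only [pvPickA, List.contains_eq_mem] at ih ⊢
    by_cases hm : pvId v ∈ used <;> cases hp : fn v <;>
      simp [hp, hm, ih]

-- B's one-pass scan computes, per predicate slot, the first unused matching id
theorem scan_eq (used : List String) (voices : List (List (String × String)))
    (st : List ((List (String × String) → Bool) × Option String)) :
    voices.foldl (fun s v => pvScanStep used v s) st
      = st.map (fun ps => (ps.1,
          match ps.2 with
          | some x => some x
          | none => (voices.find? (fun v => ps.1 v && !(used.contains (pvId v)))).map pvId)) := by
  induction voices generalizing st with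
  | nil =>
    simp only [List.foldl_nil, List.find?_nil, Option.map_none]
    conv_lhs => rw [← List.map_id st]
    apply List.map_congr_left
    rintro ⟨p, o⟩ _
    cases o <;> rfl
  | cons v vs ih =>
    rw [List.foldl_cons, ih, pvScanStep, List.map_map]
    apply List.map_congr_left
    rintro ⟨p, o⟩ _
    cases o with
    | some x => rfl
    | none =>
      by_cases hm : pvId v ∈ used <;> cases hp : p v <;>
        simp [List.contains_eq_mem, hp, hm]

theorem pick_equal (role : String) (voices_all : List (List (String × String)))
    (used_ids : List String) :
    pick_offline_voice_for_role role voices_all used_ids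
      = pick_offline_voice_for_role_alt role voices_all used_ids := by
  simp only [pick_offline_voice_for_role, pick_offline_voice_for_role_alt, scan_eq,
    pvPickA_eq_find]
  cases hpf : ["student", "woman", "female", "girl"].any
      (fun k => PySem.Str.isIn k (PySem.Str.lower role)) <;>
  cases hpm : ["prof", "teacher", "man", "male", "boy"].any
      (fun k => PySem.Str.isIn k (PySem.Str.lower role)) <;>
  · simp [pvStep, List.findSome?]
    cases hF : voices_all.find? (fun v => pvLooksFemale v && !decide (pvId v ∈ used_ids)) <;>
    cases hM : voices_all.find? (fun v => pvLooksMale v && !decide (pvId v ∈ used_ids)) <;>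
      simp [hF, hM] <;> (try split_ifs) <;> simp_all

-- ===== VERDICT (by name: the statement is the Claim_ definition above) =====
theorem pick_offline_voice_for_role_spec : Claim_equal_pick_offline_voice_for_role := by
  intro role voices_all used_ids _ _
  unfold Spec_pick_offline_voice_for_role
  exact pick_equal role voices_all used_ids
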